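-- pv_equiv track=rewrite | github.com/fengxueem/AMarktTool | models/magic_nine_model.py | find_magic_number
-- ===== SOURCE A (Python) =====
-- def find_magic_number(bool_array, magic_number):
--     sum_array = [0] * len(bool_array)
--     # 初始化变量来记录连续True的起始下标
--     count = 0  # 连续True的计数器
--
--     # 遍历布尔数组
--     for index, current in enumerate(bool_array):
--         if current:
--             # 当我们找到第一个 True 时，增加计数器
--             count += 1
--             sum_array[index] = count
--         else:
--             # 如果遇到False，重置计数器
--             count = 0
--     # 倒序遍历数组
--     for i in range(len(sum_array) - 1, -1, -1):
--         if sum_array[i] >= magic_number: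
--             return i  # 返回找到的下标
--     return -1  # 如果没有找到，则返回-1
-- ===== SOURCE B (Python) =====
-- def find_magic_number(bool_array, magic_number):
--     count = 0
--     last = -1
--     for index, current in enumerate(bool_array):
--         count = count + 1 if current else 0
--         if count >= magic_number:
--             last = index
--     return last
-- ===== Notes on version B (the rewrite author's own statement) =====
-- stated objective: simpler
-- what changed: Drops the auxiliary sum_array and the backward second pass: a single forward loop keeps the running consecutive-True count and remembers the last qualifying index.
import Mathlib
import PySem

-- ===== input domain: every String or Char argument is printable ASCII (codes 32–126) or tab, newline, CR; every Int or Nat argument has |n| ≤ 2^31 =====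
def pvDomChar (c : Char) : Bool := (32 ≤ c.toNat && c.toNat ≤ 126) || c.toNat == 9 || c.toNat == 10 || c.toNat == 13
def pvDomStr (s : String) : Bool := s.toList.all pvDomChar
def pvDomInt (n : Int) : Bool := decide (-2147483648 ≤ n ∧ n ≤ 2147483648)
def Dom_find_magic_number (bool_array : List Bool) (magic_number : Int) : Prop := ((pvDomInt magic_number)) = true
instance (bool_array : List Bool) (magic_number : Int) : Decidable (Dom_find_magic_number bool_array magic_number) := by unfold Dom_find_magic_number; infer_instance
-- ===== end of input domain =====

-- B replaces A's sum_array table + backward scan by one forward pass with a running count and a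
-- remembered last qualifying index (simpler, O(1) extra space). Both are total; return values proved equal.

-- ===== PORT A =====
-- first loop: fills sum_array left to right (count at True positions, 0 where False)
def pvSums (bool_array : List Bool) (count : Int) : List Int :=
  match bool_array with
  | [] => []
  | b :: rest =>
    if b then (count + 1) :: pvSums rest (count + 1)
    else 0 :: pvSums rest 0

-- second loop: for i in range(len-1, -1, -1): if sum_array[i] >= magic_number: return i
def pvBackScan (sum_array : List Int) (magic_number : Int) : Nat → Int
  | 0 => -1
  | n + 1 => if sum_array.getD n 0 ≥ magic_number then (n : Int) else pvBackScan sum_array magic_number n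

def find_magic_number (bool_array : List Bool) (magic_number : Int) : Int :=
  let sum_array := pvSums bool_array 0
  pvBackScan sum_array magic_number sum_array.length

-- ===== PORT B =====
def pvAltLoop (bool_array : List Bool) (magic_number : Int) (index count last : Int) : Int :=
  match bool_array with
  | [] => last
  | current :: rest =>
    let count' := if current then count + 1 else 0
    let last' := if count' ≥ magic_number then index else last
    pvAltLoop rest magic_number (index + 1) count' last'

def find_magic_number_alt (bool_array : List Bool) (magic_number : Int) : Int :=
  pvAltLoop bool_array magic_number 0 0 (-1)

-- ===== PRECONDITION & SPEC =====
def Spec_find_magic_number (bool_array : List Bool) (magic_number : Int) (out : Int) : Prop := out = find_magic_number_alt bool_array magic_number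
instance (bool_array : List Bool) (magic_number : Int) (out : Int) : Decidable (Spec_find_magic_number bool_array magic_number out) := by unfold Spec_find_magic_number; infer_instance

-- ===== CLAIM (what is proved, stated in full; the proofs are below) =====
def Claim_equal_find_magic_number : Prop := ∀ (bool_array : List Bool) (magic_number : Int), Dom_find_magic_number bool_array magic_number → Spec_find_magic_number bool_array magic_number (find_magic_number bool_array magic_number)

-- ===== LEMMAS AND PROOFS =====

-- last index (from the front) whose value meets the threshold
def pvLastHit (sa : List Int) (m : Int) : Option Nat :=
  match sa with
  | [] => none
  | v :: vs =>
    match pvLastHit vs m with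
    | some k => some (k + 1)
    | none => if v ≥ m then some 0 else none

theorem pvLastHit_append (sa : List Int) (v m : Int) :
    pvLastHit (sa ++ [v]) m =
      if v ≥ m then some sa.length else pvLastHit sa m := by
  induction sa with
  | nil => simp [pvLastHit]
  | cons x xs ih =>
    simp only [List.cons_append, pvLastHit, ih]
    by_cases h : v ≥ m <;> simp [h]

theorem pvBackScan_append (sa : List Int) (v m : Int) (n : Nat) (hn : n ≤ sa.length) :
    pvBackScan (sa ++ [v]) m n = pvBackScan sa m n := by
  induction n with
  | zero => rfl
  | succ k ih =>
    have hk : k < sa.length := hn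
    simp [pvBackScan, List.getElem?_append_left hk, ih (Nat.le_of_lt hk)]

theorem pvBackScan_lastHit (sa : List Int) (m : Int) :
    pvBackScan sa m sa.length =
      match pvLastHit sa m with
      | some k => (k : Int)
      | none => -1 := by
  induction sa using List.reverseRecOn with
  | nil => rfl
  | append_singleton xs v ih =>
    have hlen : (xs ++ [v]).length = xs.length + 1 := by simp
    rw [hlen]
    simp only [pvBackScan, pvLastHit_append]
    have hget : (xs ++ [v]).getD xs.length 0 = v := by simp
    rw [hget, pvBackScan_append xs v m xs.length (le_refl _), ih]
    by_cases h : v ≥ m <;> simp [h]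

theorem pvAltLoop_lastHit (bs : List Bool) (m : Int) :
    ∀ (i count last : Int),
      pvAltLoop bs m i count last =
        match pvLastHit (pvSums bs count) m with
        | some k => i + (k : Int)
        | none => last := by
  induction bs with
  | nil => intro i count last; rfl
  | cons b rest ih =>
    intro i count last
    by_cases hb : b
    · subst hb
      show pvAltLoop rest m (i+1) (count + 1) (if count + 1 ≥ m then i else last) = _
      rw [ih]
      show _ = (match (match pvLastHit (pvSums rest (count+1)) m with
                | some k => some (k + 1)
                | none => if count + 1 ≥ m then some 0 else none : Option Nat) with
              | some k => i + (k : Int)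
              | none => last)
      cases hx : pvLastHit (pvSums rest (count+1)) m with
      | some k => show i + 1 + (k : Int) = i + ((k + 1 : Nat) : Int); push_cast; ring
      | none => by_cases h : count + 1 ≥ m <;> simp [h]
    · simp only [Bool.not_eq_true] at hb; subst hb
      show pvAltLoop rest m (i+1) 0 (if (0 : Int) ≥ m then i else last) = _
      rw [ih]
      show _ = (match (match pvLastHit (pvSums rest 0) m with
                | some k => some (k + 1)
                | none => if (0 : Int) ≥ m then some 0 else none : Option Nat) with
              | some k => i + (k : Int)
              | none => last)
      cases hx : pvLastHit (pvSums rest 0) m with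
      | some k => show i + 1 + (k : Int) = i + ((k + 1 : Nat) : Int); push_cast; ring
      | none => by_cases h : (0 : Int) ≥ m <;> simp [h]

theorem pvSums_length (bs : List Bool) (c : Int) : (pvSums bs c).length = bs.length := by
  induction bs generalizing c with
  | nil => rfl
  | cons b rest ih => by_cases hb : b <;> simp [pvSums, hb, ih]

-- ===== VERDICT (by name: the statement is the Claim_ definition above) =====
theorem find_magic_number_spec : Claim_equal_find_magic_number := by
  intro bs m _
  show find_magic_number bs m = find_magic_number_alt bs m
  unfold find_magic_number find_magic_number_alt
  rw [pvAltLoop_lastHit bs m 0 0 (-1)]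
  simp only [pvSums_length]
  rw [show bs.length = (pvSums bs 0).length from (pvSums_length bs 0).symm,
      pvBackScan_lastHit]
  cases hx : pvLastHit (pvSums bs 0) m <;> simp
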